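-- pv_equiv track=rewrite | github.com/Levy-777/regressoes-e-rede-neural | reg_polinomial.py | gdds
-- ===== SOURCE A (Python) =====
-- def gdds(datax, datay, coeficientes = [1]):
--
--     n = len(coeficientes)
--     coeficientes_grad = [0] * n
--
--
--     for row in range(len(datax)):
--         dx = datax[row]
--         for cof in range(n):
--             erro = 0
--             for k in range(n):
--                 erro += coeficientes[k] * dx ** (n-k-1)
--
--             coeficientes_grad[cof] += 2 * ( datay[row] - erro ) * ( - dx ** (n-cof-1) )
--
--
--     return coeficientes_grad
-- ===== SOURCE B (Python) =====
-- def gdds(datax, datay, coeficientes=[1]):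
--     n = len(coeficientes)
--     m = 2 * n - 1
--     T = [0] * m          # T[j] = sum of dx**j over rows
--     U = [0] * n          # U[j] = sum of dy * dx**j over rows
--     for dx, dy in zip(datax, datay):
--         pw = []
--         p = 1
--         for _ in range(m):
--             pw.append(p)
--             p *= dx
--         T = [t + q for t, q in zip(T, pw)]
--         U = [u + dy * q for u, q in zip(U, pw)]
--     return [2 * sum(coeficientes[k] * T[2 * n - 2 - k - c] for k in range(n))
--             - 2 * U[n - 1 - c] for c in range(n)]
-- ===== Notes on version B (the rewrite author's own statement) =====
-- stated objective: faster
-- what changed: B uses a moment-accumulation (normal-equations style) algorithm: one pass over the rows collects the 2n-1 power sums T[j]=sum(dx**j) and U[j]=sum(dy*dx**j), and the gradient is then computed from these moments alone as grad[c] = 2*sum_k coef[k]*T[2n-2-k-c] - 2*U[n-1-c]; A's per-row per-coefficient error accumulation disappears.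
import Mathlib
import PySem

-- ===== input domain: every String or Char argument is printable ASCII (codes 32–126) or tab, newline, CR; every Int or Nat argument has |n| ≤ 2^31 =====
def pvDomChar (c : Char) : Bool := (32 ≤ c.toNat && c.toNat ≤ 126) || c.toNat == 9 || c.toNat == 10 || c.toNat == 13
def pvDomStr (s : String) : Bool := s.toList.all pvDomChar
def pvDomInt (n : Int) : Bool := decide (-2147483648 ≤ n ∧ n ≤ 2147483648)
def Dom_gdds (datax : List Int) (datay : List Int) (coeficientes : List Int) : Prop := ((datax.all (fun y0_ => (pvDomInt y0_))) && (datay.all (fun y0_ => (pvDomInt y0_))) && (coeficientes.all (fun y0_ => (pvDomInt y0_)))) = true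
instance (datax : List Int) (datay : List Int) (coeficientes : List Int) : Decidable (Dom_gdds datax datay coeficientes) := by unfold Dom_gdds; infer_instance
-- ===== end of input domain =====

-- B accumulates the 2n-1 power-sum moments T[j]=Σdx^j, U[j]=Σdy·dx^j in one pass and computes the
-- gradient from the moments alone (normal-equations style); faster in a timing run; equivalence
-- proved for len(datay) ≥ len(datax) (A raises IndexError otherwise).


-- ===== PORT A =====
def gdds (datax : List Int) (datay : List Int) (coeficientes : List Int) : List Int :=
  let n : Int := coeficientes.length
  let coeficientes_grad : List Int := List.replicate n.toNat 0
  (PySem.List.pyRange 0 datax.length 1).foldl (fun grad row =>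
    let dx := PySem.List.pyGetD datax row 0
    (PySem.List.pyRange 0 n 1).foldl (fun grad cof =>
      let erro := (PySem.List.pyRange 0 n 1).foldl
        (fun erro k => erro + PySem.List.pyGetD coeficientes k 0 * dx ^ (n - k - 1).toNat) 0
      grad.modify cof.toNat
        (fun g => g + 2 * (PySem.List.pyGetD datay row 0 - erro) * (-(dx ^ (n - cof - 1).toNat)))
    ) grad
  ) coeficientes_grad

-- ===== PORT B =====
def gdds_alt (datax : List Int) (datay : List Int) (coeficientes : List Int) : List Int :=
  let n := coeficientes.length
  let m : Int := 2 * (n : Int) - 1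
  let TU := (datax.zip datay).foldl (fun (tu : List Int × List Int) p =>
      let pw := ((PySem.List.pyRange 0 m 1).foldl
          (fun (s : List Int × Int) _ => (s.1 ++ [s.2], s.2 * p.1)) ([], 1)).1
      ((tu.1.zip pw).map (fun q => q.1 + q.2),
       (tu.2.zip pw).map (fun q => q.1 + p.2 * q.2)))
    (List.replicate m.toNat 0, List.replicate n 0)
  (List.range n).map (fun (c : Nat) =>
    2 * ((List.range n).map (fun (k : Nat) =>
        PySem.List.pyGetD coeficientes (k : Int) 0 *
        PySem.List.pyGetD TU.1 (2 * (n : Int) - 2 - (k : Int) - (c : Int)) 0)).sum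
    - 2 * PySem.List.pyGetD TU.2 ((n : Int) - 1 - (c : Int)) 0)

-- ===== PRECONDITION & SPEC =====
-- Pre_ excludes only inputs with len(datay) < len(datax) and a nonempty coefficient list,
-- exactly the inputs on which A raises IndexError at datay[row].
def Pre_gdds (datax : List Int) (datay : List Int) (coeficientes : List Int) : Prop :=
  coeficientes = [] ∨ datax.length ≤ datay.length
instance (datax : List Int) (datay : List Int) (coeficientes : List Int) : Decidable (Pre_gdds datax datay coeficientes) := by unfold Pre_gdds; infer_instance

def pvWitness_gdds : List Int × List Int × List Int := ([1, 2], [3, 4], [1, 0])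

def Spec_gdds (datax : List Int) (datay : List Int) (coeficientes : List Int) (out : List Int) : Prop := out = gdds_alt datax datay coeficientes
instance (datax : List Int) (datay : List Int) (coeficientes : List Int) (out : List Int) : Decidable (Spec_gdds datax datay coeficientes out) := by unfold Spec_gdds; infer_instance

-- ===== CLAIM (what is proved, stated in full; the proofs are below) =====
def Claim_equal_gdds : Prop := ∀ (datax : List Int) (datay : List Int) (coeficientes : List Int), Dom_gdds datax datay coeficientes → Pre_gdds datax datay coeficientes → Spec_gdds datax datay coeficientes (gdds datax datay coeficientes)

-- ===== LEMMAS AND PROOFS =====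

-- ---- the common reference value: each gradient entry as a sum over the rows ----

-- P(dx): the polynomial value A calls 'erro'
def pvP (coef : List Int) (dx : Int) : Int :=
  ((coef.zip ((List.range coef.length).map (fun j => dx ^ (coef.length - j - 1)))).map
    (fun q => q.1 * q.2)).sum

-- the c-th gradient entry as a sum of per-row contributions
def pvS (coef : List Int) (rows : List (Int × Int)) (c : Nat) : Int :=
  (rows.map (fun p => 2 * (p.2 - pvP coef p.1) * (-(p.1 ^ (coef.length - c - 1))))).sum

-- ---- small list lemmas ----

theorem pv_modify_cons (b : Int) (t : List Int) (j : Nat) (f : Int → Int) :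
    (b :: t).modify (j+1) f = b :: t.modify j f := by simp [List.modify]

theorem pv_mapIdx_eq_map_range (l : List Int) (F : Nat → Int → Int) :
    l.mapIdx F = (List.range l.length).map (fun k => F k (l.getD k 0)) := by
  induction l generalizing F with
  | nil => simp
  | cons a t ih =>
      simp [List.mapIdx_cons, List.range_succ_eq_map, List.map_map, ih]

theorem pv_zip_map_range (l : List Int) (f : Nat → Int) (op : Int → Int → Int) :
    ((l.zip ((List.range l.length).map f)).map (fun q => op q.1 q.2))
      = l.mapIdx (fun i v => op v (f i)) := by
  induction l generalizing f with
  | nil => simp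
  | cons a t ih =>
      simp only [List.length_cons, List.range_succ_eq_map, List.map_cons, List.map_map,
        List.zip_cons_cons, List.mapIdx_cons]
      congr 1
      have := ih (fun j => f (j + 1))
      simpa [Function.comp] using this

theorem pv_modify_tail (idxs : List Nat) (b : Int) (t : List Int) (G : Nat → Int → Int) :
    idxs.foldl (fun g j => g.modify (j+1) (G j)) (b :: t)
      = b :: idxs.foldl (fun g j => g.modify j (G j)) t := by
  induction idxs generalizing t with
  | nil => rfl
  | cons j idxs ih =>
      simp only [List.foldl_cons, pv_modify_cons]
      exact ih _

theorem pv_modify_fold (g : List Int) (F : Nat → Int → Int) :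
    (List.range g.length).foldl (fun g i => g.modify i (F i)) g = g.mapIdx F := by
  induction g generalizing F with
  | nil => simp
  | cons a t ih =>
      simp only [List.length_cons, List.range_succ_eq_map, List.foldl_cons, List.foldl_map,
        List.mapIdx_cons]
      have h0 : (a :: t).modify 0 (F 0) = F 0 a :: t := by simp [List.modify]
      rw [h0]
      calc List.foldl (fun g j => g.modify (Nat.succ j) (F (Nat.succ j))) (F 0 a :: t) (List.range t.length)
          = List.foldl (fun g j => g.modify (j+1) ((fun i => F (i+1)) j)) (F 0 a :: t) (List.range t.length) := rfl
        _ = F 0 a :: List.foldl (fun g j => g.modify j ((fun i => F (i+1)) j)) t (List.range t.length) := pv_modify_tail _ _ _ _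
        _ = F 0 a :: t.mapIdx (fun i => F (i+1)) := by rw [ih]

theorem pv_foldl_range_zip (xs ys : List Int) (F : List Int → Int → Int → List Int)
    (h : xs.length ≤ ys.length) :
    ∀ g : List Int,
      (List.range xs.length).foldl (fun g r => F g (xs.getD r 0) (ys.getD r 0)) g
        = (xs.zip ys).foldl (fun g p => F g p.1 p.2) g := by
  induction xs generalizing ys with
  | nil => intro g; simp
  | cons x xs ih =>
      intro g
      cases ys with
      | nil => simp at h
      | cons y ys =>
          simp only [List.length_cons, List.range_succ_eq_map, List.foldl_cons, List.foldl_map,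
            List.zip_cons_cons, List.getD_cons_zero]
          have := ih ys (by simpa using h) (F g x y)
          simpa using this

theorem pv_getD_map_range (n : Nat) (f : Nat → Int) (c : Nat) (hc : c < n) :
    (((List.range n).map f).getD c 0) = f c := by
  simp [List.getD, hc]

theorem pv_map_range_getD (g : List Int) :
    (List.range g.length).map (fun i => g.getD i 0) = g := by
  induction g with
  | nil => simp
  | cons a t ih =>
      simp only [List.length_cons, List.range_succ_eq_map, List.map_cons, List.map_map]
      simpa [Function.comp] using congrArg (a :: ·) ih

theorem pv_zip_eq_zip_take (l1 l2 : List Int) : l1.zip l2 = l1.zip (l2.take l1.length) := by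
  induction l1 generalizing l2 with
  | nil => simp
  | cons a t ih =>
      cases l2 with
      | nil => simp
      | cons b u => simp [List.zip_cons_cons, ih u]

theorem pv_sum_map_add {α : Type} (l : List α) (f g : α → Int) :
    (l.map (fun x => f x + g x)).sum = (l.map f).sum + (l.map g).sum := by
  induction l with
  | nil => simp
  | cons a t ih => simp [ih]; ring

theorem pv_foldl_inv (ps : List (Int × Int)) (s t : List Int → (Int × Int) → List Int) (n : Nat)
    (hst : ∀ g p, g.length = n → s g p = t g p)
    (hlen : ∀ g p, g.length = n → (t g p).length = n) :
    ∀ g : List Int, g.length = n → ps.foldl s g = ps.foldl t g := by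
  induction ps with
  | nil => intro g _; rfl
  | cons p ps ih =>
      intro g hg
      simp only [List.foldl_cons, hst g p hg]
      exact ih _ (hlen g p hg)

theorem pv_sum_map_sub {α : Type} (l : List α) (f g : α → Int) :
    (l.map (fun x => f x - g x)).sum = (l.map f).sum - (l.map g).sum := by
  induction l with
  | nil => simp
  | cons a t ih => simp [ih]; ring

theorem pv_sum_swap {α : Type} (xs : List α) (rows : List (Int × Int)) (f : α → Int × Int → Int) :
    (xs.map (fun x => (rows.map (f x)).sum)).sum
      = (rows.map (fun p => (xs.map (fun x => f x p)).sum)).sum := by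
  induction xs with
  | nil => simp
  | cons a t ih =>
      simp only [List.map_cons, List.sum_cons, ih]
      rw [← pv_sum_map_add rows (f a) (fun p => (t.map (fun x => f x p)).sum)]

-- ---- A's erro loop equals pvP ----
theorem pv_erro (coef : List Int) (dx : Int) :
    (PySem.List.pyRange 0 (coef.length : Int) 1).foldl
      (fun e k => e + PySem.List.pyGetD coef k 0 * dx ^ (((coef.length : Int) - k - 1)).toNat) 0
    = pvP coef dx := by
  unfold pvP
  rw [pv_zip_map_range coef _ (fun a b => a * b), pv_mapIdx_eq_map_range]
  rw [PySem.List.pyRange_zero_nat, List.foldl_map]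
  rw [PySem.List.foldl_congr_mem (List.range coef.length) _
    (fun e (k : Nat) => e + coef.getD k 0 * dx ^ (coef.length - k - 1)) 0
    (by intro acc k hk
        simp only [List.mem_range] at hk
        simp only [PySem.List.pyGetD_natCast]
        have hx : (((coef.length : Int)) - k - 1).toNat = coef.length - k - 1 := by omega
        rw [hx])]
  rw [PySem.List.foldl_add (List.range coef.length)
    (fun (k : Nat) => coef.getD k 0 * dx ^ (coef.length - k - 1)) 0]
  simp

-- ---- A's inner coefficient loop as a zip-map row step ----
theorem pv_row (n : Nat) (g : List Int) (dx dy e : Int) (hg : g.length = n) :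
    (PySem.List.pyRange 0 (n : Int) 1).foldl
      (fun g cof => g.modify cof.toNat
        (fun v => v + 2 * (dy - e) * (-(dx ^ (((n : Int) - cof - 1)).toNat)))) g
    = (g.zip ((List.range n).map (fun j => dx ^ (n - j - 1)))).map
        (fun q => q.1 - 2 * (dy - e) * q.2) := by
  rw [PySem.List.pyRange_zero_nat, List.foldl_map]
  have h1 : ∀ (acc : List Int) (k : Nat), k ∈ List.range n →
      acc.modify (↑k : Int).toNat (fun v => v + 2 * (dy - e) * (-(dx ^ (((n : Int) - (↑k : Int) - 1)).toNat)))
      = acc.modify k (fun v => v + 2 * (dy - e) * (-(dx ^ (n - k - 1)))) := by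
    intro acc k hk
    simp only [List.mem_range] at hk
    have : (((n : Int) - (↑k : Int) - 1)).toNat = n - k - 1 := by omega
    simp [this]
  rw [PySem.List.foldl_congr_mem (List.range n) _
    (fun (g : List Int) (k : Nat) => g.modify k (fun v => v + 2 * (dy - e) * (-(dx ^ (n - k - 1))))) g h1]
  rw [← hg, pv_modify_fold, pv_zip_map_range g _ (fun a b => a - 2 * (dy - e) * b)]
  congr 1
  funext i v
  ring

-- ---- A's fold characterised by per-row sums ----
theorem pv_foldA_sums (coef : List Int) (rows : List (Int × Int)) :
    ∀ g : List Int, g.length = coef.length →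
      rows.foldl (fun g p =>
          (g.zip ((List.range coef.length).map (fun j => p.1 ^ (coef.length - j - 1)))).map
            (fun q => q.1 - 2 * (p.2 - pvP coef p.1) * q.2)) g
        = (List.range coef.length).map (fun c => g.getD c 0 + pvS coef rows c) := by
  induction rows with
  | nil =>
      intro g hg
      simp only [List.foldl_nil, pvS, List.map_nil, List.sum_nil, add_zero]
      rw [← hg, pv_map_range_getD]
  | cons p rows ih =>
      intro g hg
      simp only [List.foldl_cons]
      rw [show ((List.range coef.length).map (fun j => p.1 ^ (coef.length - j - 1)))
            = ((List.range g.length).map (fun j => p.1 ^ (coef.length - j - 1))) from by rw [hg]]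
      rw [pv_zip_map_range g _ (fun a b => a - 2 * (p.2 - pvP coef p.1) * b),
          pv_mapIdx_eq_map_range]
      rw [show g.length = coef.length from hg]
      rw [ih _ (by simp)]
      apply List.map_congr_left
      intro c hc
      simp only [List.mem_range] at hc
      rw [pv_getD_map_range _ _ _ hc]
      simp only [pvS, List.map_cons, List.sum_cons]
      ring

-- ---- A equals the reference ----
theorem pv_A_char (datax datay coef : List Int) (h : datax.length ≤ datay.length) :
    gdds datax datay coef
      = (List.range coef.length).map (fun c => pvS coef (datax.zip datay) c) := by
  unfold gdds
  simp only []
  rw [PySem.List.pyRange_zero_nat datax.length, List.foldl_map]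
  rw [PySem.List.foldl_congr_mem (List.range datax.length) _
    (fun (grad : List Int) (r : Nat) =>
      (PySem.List.pyRange 0 (coef.length : Int) 1).foldl (fun grad cof =>
        grad.modify cof.toNat
          (fun g => g + 2 * (datay.getD r 0 -
              (PySem.List.pyRange 0 (coef.length : Int) 1).foldl
                (fun erro k => erro + PySem.List.pyGetD coef k 0 *
                  (datax.getD r 0) ^ (((coef.length : Int)) - k - 1).toNat) 0) *
            (-((datax.getD r 0) ^ (((coef.length : Int)) - cof - 1).toNat)))) grad)
    (List.replicate ((coef.length : Int)).toNat 0)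
    (by intro acc r _; simp [PySem.List.pyGetD_natCast])]
  rw [pv_foldl_range_zip datax datay
    (fun (grad : List Int) (dx dy : Int) =>
      (PySem.List.pyRange 0 (coef.length : Int) 1).foldl (fun grad cof =>
        grad.modify cof.toNat
          (fun g => g + 2 * (dy -
              (PySem.List.pyRange 0 (coef.length : Int) 1).foldl
                (fun erro k => erro + PySem.List.pyGetD coef k 0 *
                  dx ^ (((coef.length : Int)) - k - 1).toNat) 0) *
            (-(dx ^ (((coef.length : Int)) - cof - 1).toNat)))) grad) h]
  rw [show ((coef.length : Int)).toNat = coef.length from by simp]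
  have hstep : ∀ (g : List Int) (p : Int × Int), g.length = coef.length →
      (PySem.List.pyRange 0 (coef.length : Int) 1).foldl (fun grad cof =>
        grad.modify cof.toNat
          (fun v => v + 2 * (p.2 -
              (PySem.List.pyRange 0 (coef.length : Int) 1).foldl
                (fun erro k => erro + PySem.List.pyGetD coef k 0 *
                  p.1 ^ (((coef.length : Int)) - k - 1).toNat) 0) *
            (-(p.1 ^ (((coef.length : Int)) - cof - 1).toNat)))) g
      = (g.zip ((List.range coef.length).map (fun j => p.1 ^ (coef.length - j - 1)))).map
          (fun q => q.1 - 2 * (p.2 - pvP coef p.1) * q.2) := by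
    intro g p hg
    rw [pv_erro coef p.1] at *
    exact pv_row coef.length g p.1 p.2 _ hg
  rw [pv_foldl_inv (datax.zip datay) _
        (fun (g : List Int) (p : Int × Int) =>
          (g.zip ((List.range coef.length).map (fun j => p.1 ^ (coef.length - j - 1)))).map
            (fun q => q.1 - 2 * (p.2 - pvP coef p.1) * q.2))
        coef.length hstep
        (by intro g p hg; simp [hg]) (List.replicate coef.length 0) (by simp)]
  rw [pv_foldA_sums coef (datax.zip datay) _ (by simp)]
  simp

-- pvP as a sum over indices
theorem pvP_eq_range (coef : List Int) (dx : Int) :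
    pvP coef dx
      = ((List.range coef.length).map (fun k => coef.getD k 0 * dx ^ (coef.length - k - 1))).sum := by
  unfold pvP
  rw [pv_zip_map_range coef _ (fun a b => a * b), pv_mapIdx_eq_map_range]

-- the c-th gradient entry computed from the moments equals the per-row sum pvS
theorem pv_entry (coef : List Int) (rows : List (Int × Int)) (c : Nat) (hc : c < coef.length) :
    2 * ((List.range coef.length).map (fun k =>
        coef.getD k 0 * (rows.map (fun p => p.1 ^ (2 * coef.length - 2 - k - c))).sum)).sum
      - 2 * (rows.map (fun p => p.2 * p.1 ^ (coef.length - 1 - c))).sum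
    = pvS coef rows c := by
  set n := coef.length with hn
  unfold pvS
  -- rewrite each row's contribution as (sum over k) minus the dy term
  have hrow : ∀ p : Int × Int,
      2 * (p.2 - pvP coef p.1) * (-(p.1 ^ (n - c - 1)))
        = ((List.range n).map (fun k =>
            2 * (coef.getD k 0 * p.1 ^ (2 * n - 2 - k - c)))).sum
          - 2 * (p.2 * p.1 ^ (n - 1 - c)) := by
    intro p
    rw [pvP_eq_range, ← hn]
    have h2 : n - 1 - c = n - c - 1 := by omega
    rw [h2]
    have : (List.range n).map (fun k => 2 * (coef.getD k 0 * p.1 ^ (2 * n - 2 - k - c)))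
        = (List.range n).map (fun k =>
            2 * (coef.getD k 0 * p.1 ^ (n - k - 1)) * p.1 ^ (n - c - 1)) := by
      apply List.map_congr_left
      intro k hk
      simp only [List.mem_range] at hk
      rw [mul_assoc, mul_assoc, ← pow_add]
      congr 3
      omega
    rw [this, List.sum_map_mul_right, List.sum_map_mul_left]
    ring
  rw [List.map_congr_left (fun p _ => hrow p), pv_sum_map_sub]
  congr 1
  · -- swap the double sum
    rw [← pv_sum_swap (List.range n) rows
        (fun k p => 2 * (coef.getD k 0 * p.1 ^ (2 * n - 2 - k - c)))]
    rw [← List.sum_map_mul_left]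
    apply congrArg
    apply List.map_congr_left
    intro k _
    have : rows.map (fun p => 2 * (coef.getD k 0 * p.1 ^ (2 * n - 2 - k - c)))
        = rows.map (fun p => (2 * coef.getD k 0) * p.1 ^ (2 * n - 2 - k - c)) := by
      apply List.map_congr_left; intro p _; ring
    rw [this, List.sum_map_mul_left]
    ring
  · rw [← List.sum_map_mul_left]

-- ---- B side ----

-- the running-power loop builds the list of powers
theorem pv_powers_fold (dx : Int) (idxs : List Int) :
    ∀ (l : List Int) (p : Int),
      idxs.foldl (fun (s : List Int × Int) _ => (s.1 ++ [s.2], s.2 * dx)) (l, p)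
        = (l ++ (List.range idxs.length).map (fun i => p * dx ^ i), p * dx ^ idxs.length) := by
  induction idxs with
  | nil => intro l p; simp
  | cons a t ih =>
      intro l p
      simp only [List.foldl_cons, ih, List.length_cons]
      rw [Prod.mk.injEq]
      refine ⟨?_, by ring⟩
      rw [List.range_succ_eq_map]
      simp only [List.map_cons, List.map_map]
      rw [List.append_assoc]
      congr 1
      simp only [pow_zero, mul_one, List.singleton_append]
      congr 1
      apply List.map_congr_left
      intro i _
      simp [Function.comp, pow_succ]
      ring

theorem pv_pw (dx : Int) (M : Int) :
    ((PySem.List.pyRange 0 M 1).foldl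
        (fun (s : List Int × Int) _ => (s.1 ++ [s.2], s.2 * dx)) ([], 1)).1
      = (List.range M.toNat).map (fun i => dx ^ i) := by
  rw [pv_powers_fold dx (PySem.List.pyRange 0 M 1) [] 1]
  simp [PySem.List.length_pyRange_one]

-- B's moment fold characterised by power sums
theorem pv_foldB_sums (n M : Nat) (hnM : n ≤ M) (rows : List (Int × Int)) :
    ∀ (T U : List Int), T.length = M → U.length = n →
      rows.foldl (fun (tu : List Int × List Int) p =>
          let pw := (List.range M).map (fun i => p.1 ^ i)
          ((tu.1.zip pw).map (fun q => q.1 + q.2),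
           (tu.2.zip pw).map (fun q => q.1 + p.2 * q.2))) (T, U)
        = ((List.range M).map (fun j => T.getD j 0 + (rows.map (fun p => p.1 ^ j)).sum),
           (List.range n).map (fun j => U.getD j 0 + (rows.map (fun p => p.2 * p.1 ^ j)).sum)) := by
  induction rows with
  | nil =>
      intro T U hT hU
      simp only [List.foldl_nil, List.map_nil, List.sum_nil, add_zero]
      rw [← hT, ← hU, pv_map_range_getD, pv_map_range_getD]
  | cons p rows ih =>
      intro T U hT hU
      simp only [List.foldl_cons]
      have hTz : (T.zip ((List.range M).map (fun i => p.1 ^ i))).map (fun q => q.1 + q.2)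
          = (List.range M).map (fun j => T.getD j 0 + p.1 ^ j) := by
        rw [show ((List.range M).map (fun i => p.1 ^ i))
              = ((List.range T.length).map (fun i => p.1 ^ i)) from by rw [hT]]
        rw [pv_zip_map_range T _ (fun a b => a + b), pv_mapIdx_eq_map_range, hT]
      have hUz : (U.zip ((List.range M).map (fun i => p.1 ^ i))).map (fun q => q.1 + p.2 * q.2)
          = (List.range n).map (fun j => U.getD j 0 + p.2 * p.1 ^ j) := by
        have htr : U.zip ((List.range M).map (fun i => p.1 ^ i))
            = U.zip ((List.range n).map (fun i => p.1 ^ i)) := by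
          rw [pv_zip_eq_zip_take U ((List.range M).map (fun i => p.1 ^ i)),
              pv_zip_eq_zip_take U ((List.range n).map (fun i => p.1 ^ i))]
          rw [← List.map_take, ← List.map_take, List.take_range, List.take_range, hU,
              Nat.min_eq_left hnM, Nat.min_self]
        rw [htr, show ((List.range n).map (fun i => p.1 ^ i))
              = ((List.range U.length).map (fun i => p.1 ^ i)) from by rw [hU]]
        rw [pv_zip_map_range U _ (fun a b => a + p.2 * b), pv_mapIdx_eq_map_range, hU]
      simp only [hTz, hUz]
      rw [ih _ _ (by simp) (by simp)]
      rw [Prod.mk.injEq]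
      constructor
      · apply List.map_congr_left
        intro j hj
        simp only [List.mem_range] at hj
        rw [pv_getD_map_range _ _ _ hj]
        simp [add_assoc]
      · apply List.map_congr_left
        intro j hj
        simp only [List.mem_range] at hj
        rw [pv_getD_map_range _ _ _ hj]
        simp [add_assoc]

-- ---- B equals the reference ----
theorem pv_B_char (datax datay coef : List Int) :
    gdds_alt datax datay coef
      = (List.range coef.length).map (fun c => pvS coef (datax.zip datay) c) := by
  unfold gdds_alt
  simp only []
  set n := coef.length with hn
  set rows := datax.zip datay with hrows
  have hfold :
      rows.foldl (fun (tu : List Int × List Int) p =>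
          let pw := ((PySem.List.pyRange 0 (2 * (n : Int) - 1) 1).foldl
              (fun (s : List Int × Int) _ => (s.1 ++ [s.2], s.2 * p.1)) ([], 1)).1
          ((tu.1.zip pw).map (fun q => q.1 + q.2),
           (tu.2.zip pw).map (fun q => q.1 + p.2 * q.2)))
        (List.replicate (2 * (n : Int) - 1).toNat 0, List.replicate n 0)
      = ((List.range (2 * (n : Int) - 1).toNat).map
            (fun j => (rows.map (fun p => p.1 ^ j)).sum),
         (List.range n).map (fun j => (rows.map (fun p => p.2 * p.1 ^ j)).sum)) := by
    have hcong : rows.foldl (fun (tu : List Int × List Int) p =>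
          let pw := ((PySem.List.pyRange 0 (2 * (n : Int) - 1) 1).foldl
              (fun (s : List Int × Int) _ => (s.1 ++ [s.2], s.2 * p.1)) ([], 1)).1
          ((tu.1.zip pw).map (fun q => q.1 + q.2),
           (tu.2.zip pw).map (fun q => q.1 + p.2 * q.2)))
        (List.replicate (2 * (n : Int) - 1).toNat 0, List.replicate n 0)
        = rows.foldl (fun (tu : List Int × List Int) p =>
          let pw := (List.range (2 * (n : Int) - 1).toNat).map (fun i => p.1 ^ i)
          ((tu.1.zip pw).map (fun q => q.1 + q.2),
           (tu.2.zip pw).map (fun q => q.1 + p.2 * q.2)))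
        (List.replicate (2 * (n : Int) - 1).toNat 0, List.replicate n 0) := by
      have hfeq : (fun (tu : List Int × List Int) (p : Int × Int) =>
          let pw := ((PySem.List.pyRange 0 (2 * (n : Int) - 1) 1).foldl
              (fun (s : List Int × Int) _ => (s.1 ++ [s.2], s.2 * p.1)) ([], 1)).1
          ((tu.1.zip pw).map (fun q => q.1 + q.2),
           (tu.2.zip pw).map (fun q => q.1 + p.2 * q.2)))
          = (fun (tu : List Int × List Int) (p : Int × Int) =>
          let pw := (List.range (2 * (n : Int) - 1).toNat).map (fun i => p.1 ^ i)
          ((tu.1.zip pw).map (fun q => q.1 + q.2),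
           (tu.2.zip pw).map (fun q => q.1 + p.2 * q.2))) := by
        funext tu p
        simp only [pv_pw]
      rw [hfeq]
    rw [hcong]
    rw [pv_foldB_sums n (2 * (n : Int) - 1).toNat (by omega) rows
        (List.replicate (2 * (n : Int) - 1).toNat 0) (List.replicate n 0) (by simp) (by simp)]
    simp
  rw [hfold]
  apply List.map_congr_left
  intro c hc
  simp only [List.mem_range] at hc
  have hn1 : 1 ≤ n := by omega
  -- U lookup
  have hUidx : ((n : Int) - 1 - (c : Int)) = ((n - 1 - c : Nat) : Int) := by omega
  rw [hUidx, PySem.List.pyGetD_natCast, pv_getD_map_range _ _ _ (by omega)]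
  -- T lookups, inside the k-sum
  have hsum1 : ((List.range n).map (fun (k : Nat) =>
      PySem.List.pyGetD coef (k : Int) 0 *
      PySem.List.pyGetD ((List.range (2 * (n : Int) - 1).toNat).map
          (fun j => (rows.map (fun p => p.1 ^ j)).sum))
        (2 * (n : Int) - 2 - (k : Int) - (c : Int)) 0)).sum
      = ((List.range n).map (fun (k : Nat) =>
          coef.getD k 0 * (rows.map (fun p => p.1 ^ (2 * n - 2 - k - c))).sum)).sum := by
    apply congrArg
    apply List.map_congr_left
    intro k hk
    simp only [List.mem_range] at hk
    have hidx : (2 * (n : Int) - 2 - (k : Int) - (c : Int)) = ((2 * n - 2 - k - c : Nat) : Int) := by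
      omega
    rw [hidx, PySem.List.pyGetD_natCast, PySem.List.pyGetD_natCast,
        pv_getD_map_range _ _ _ (by omega)]
  rw [hsum1]
  exact pv_entry coef rows c hc

-- with no coefficients both programs return []
theorem pv_nil_A (datax datay : List Int) : gdds datax datay [] = [] := by
  unfold gdds
  simp only [List.length_nil, Nat.cast_zero, Int.toNat_zero, List.replicate_zero,
    PySem.List.pyRange_one_eq_nil (le_refl (0 : Int)), List.foldl_nil]
  induction PySem.List.pyRange 0 (datax.length : Int) 1 with
  | nil => rfl
  | cons a t ih => simpa using ih

theorem pv_nil_B (datax datay : List Int) : gdds_alt datax datay [] = [] := by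
  unfold gdds_alt
  simp

-- ===== VERDICT (by name: the statement is the Claim_ definition above) =====
theorem gdds_spec : Claim_equal_gdds := by
  intro datax datay coef _ hpre
  unfold Spec_gdds
  rcases hpre with h | h
  · subst h
    rw [pv_nil_A, pv_nil_B]
  · rw [pv_A_char datax datay coef h, pv_B_char datax datay coef]
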